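-- pv_equiv track=rewrite | github.com/atamelo/python-algo | misc/find_area_with_min_cost.py | find_area
-- ===== SOURCE A (Python) =====
-- def find_area(field, row_count, column_count):
--     RECT_WIDTH = 3
--     RECT_HEIGHT = 3
--
--     def get_sum_for(field, upper_left_row, upper_left_column):
--         s = 0
--         for row in range(upper_left_row, upper_left_row + RECT_HEIGHT):
--             for column in range(upper_left_column, upper_left_column + RECT_WIDTH):
--                 s += field[row][column]
--
--         return s
--
--     def move_right(field, current_row, current_column, current_sum):
--         old_column_sum = 0
--         for row in range(current_row, current_row + RECT_HEIGHT):
--             old_column_sum += field[row][current_column]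
--
--         new_sum = current_sum - old_column_sum
--         new_column_sum = 0
--         for row in range(current_row, current_row + RECT_HEIGHT):
--             new_column_sum += field[row][current_column + RECT_WIDTH]
--
--         new_sum += new_column_sum
--
--         return new_sum
--
--     def move_down(field, curent_row, current_column, current_sum):
--         old_row_sum = 0
--         for column in range(current_column, current_column + RECT_WIDTH):
--             old_row_sum += field[curent_row][column]
--
--         new_sum = current_sum - old_row_sum
--         new_row_sum = 0
--         for column in range(current_column, current_column + RECT_WIDTH):
--             new_row_sum += field[curent_row + RECT_HEIGHT][column]
--
--         new_sum += new_row_sum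
--
--         return new_sum
--
--     min_sum = get_sum_for(field, 0, 0)
--     curr_sum = min_sum
--     first_row_sum = curr_sum
--     for row in range(0, row_count - RECT_HEIGHT + 1):
--         for column in range(0, column_count - RECT_WIDTH):
--             curr_sum = move_right(field, row, column, curr_sum)
--             min_sum = min(min_sum, curr_sum)
--
--         # we need to skip 'move_down' if we're scanning the 'last row'
--         if row + RECT_HEIGHT < row_count:
--             curr_sum = move_down(field, row, 0, first_row_sum)
--             min_sum = min(min_sum, curr_sum)
--             first_row_sum = curr_sum
--
--     return min_sum
-- ===== SOURCE B (Python) =====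
-- def find_area(field, row_count, column_count):
--     def window_sum(r, c):
--         return sum(field[r + i][c + j] for i in range(3) for j in range(3))
--
--     best = window_sum(0, 0)
--     for r in range(row_count - 2):
--         for c in range(column_count - 2):
--             best = min(best, window_sum(r, c))
--     return best
-- ===== Notes on version B (the rewrite author's own statement) =====
-- stated objective: simpler
-- what changed: Replaces A's stateful sliding-window scan (incremental move_right/move_down updates of a running sum plus a first-column cache) by recomputing each 3x3 window sum directly inside a plain min-accumulating double loop seeded with the (0,0) window.
-- outside the precondition, e.g. on find_area([[9, 9, 9], [9, 9, 9], [9, 9, 9], [0, 0, 0]], 4, 2): A returns 54, B returns 81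
import Mathlib
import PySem

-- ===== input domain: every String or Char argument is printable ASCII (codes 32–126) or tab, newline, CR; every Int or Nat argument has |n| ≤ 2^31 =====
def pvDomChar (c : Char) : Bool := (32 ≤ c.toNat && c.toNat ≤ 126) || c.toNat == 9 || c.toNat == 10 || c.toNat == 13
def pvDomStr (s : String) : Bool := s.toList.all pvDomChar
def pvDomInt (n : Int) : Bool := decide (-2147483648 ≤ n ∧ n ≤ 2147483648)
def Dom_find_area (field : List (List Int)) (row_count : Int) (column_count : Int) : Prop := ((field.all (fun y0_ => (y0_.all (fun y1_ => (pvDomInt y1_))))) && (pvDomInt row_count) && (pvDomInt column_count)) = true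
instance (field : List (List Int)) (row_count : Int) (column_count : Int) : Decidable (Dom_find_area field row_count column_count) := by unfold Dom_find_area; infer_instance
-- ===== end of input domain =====

-- B replaces A's incremental sliding-window scan by a direct min over freshly recomputed 3x3 window sums (simpler, same asymptotic cost).


-- ===== PORT A =====
-- field[row][column]; the getD defaults are junk outside Pre_ (Python raises IndexError there)
def pvCellA (field : List (List Int)) (r c : Int) : Int :=
  (PySem.List.pyGet? ((PySem.List.pyGet? field r).getD []) c).getD 0

def pvGetSumFor (field : List (List Int)) (ur uc : Int) : Int :=
  (PySem.List.pyRange ur (ur + 3) 1).foldl (fun s row =>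
    (PySem.List.pyRange uc (uc + 3) 1).foldl (fun s col => s + pvCellA field row col) s) 0

def pvMoveRight (field : List (List Int)) (r c cur : Int) : Int :=
  let oldc := (PySem.List.pyRange r (r + 3) 1).foldl (fun s row => s + pvCellA field row c) 0
  let ns := cur - oldc
  let newc := (PySem.List.pyRange r (r + 3) 1).foldl (fun s row => s + pvCellA field row (c + 3)) 0
  ns + newc

def pvMoveDown (field : List (List Int)) (r c cur : Int) : Int :=
  let oldr := (PySem.List.pyRange c (c + 3) 1).foldl (fun s col => s + pvCellA field r col) 0
  let ns := cur - oldr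
  let newr := (PySem.List.pyRange c (c + 3) 1).foldl (fun s col => s + pvCellA field (r + 3) col) 0
  ns + newr

def pvInnerStep (field : List (List Int)) (row : Int) (p : Int × Int) (col : Int) : Int × Int :=
  let ns := pvMoveRight field row col p.2
  (min p.1 ns, ns)

-- one iteration of A's outer loop; state = (min_sum, curr_sum, first_row_sum)
def pvOuterStep (field : List (List Int)) (rc cc : Int) (st : Int × Int × Int) (row : Int) : Int × Int × Int :=
  let inner := (PySem.List.pyRange 0 (cc - 3) 1).foldl (pvInnerStep field row) (st.1, st.2.1)
  if row + 3 < rc then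
    let nd := pvMoveDown field row 0 st.2.2
    (min inner.1 nd, nd, nd)
  else
    (inner.1, inner.2, st.2.2)

def find_area (field : List (List Int)) (row_count : Int) (column_count : Int) : Int :=
  let ms := pvGetSumFor field 0 0
  ((PySem.List.pyRange 0 (row_count - 3 + 1) 1).foldl (pvOuterStep field row_count column_count) (ms, ms, ms)).1

-- ===== PORT B =====
def pvCellB (field : List (List Int)) (r c : Int) : Int :=
  (PySem.List.pyGet? ((PySem.List.pyGet? field r).getD []) c).getD 0

-- sum(field[r+i][c+j] for i in range(3) for j in range(3))
def pvWinB (field : List (List Int)) (r c : Int) : Int :=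
  (PySem.List.pyRange 0 3 1).foldl (fun s i =>
    (PySem.List.pyRange 0 3 1).foldl (fun s j => s + pvCellB field (r + i) (c + j)) s) 0

def find_area_alt (field : List (List Int)) (row_count : Int) (column_count : Int) : Int :=
  let best := pvWinB field 0 0
  (PySem.List.pyRange 0 (row_count - 2) 1).foldl (fun b r =>
    (PySem.List.pyRange 0 (column_count - 2) 1).foldl (fun b c => min b (pvWinB field r c)) b) best

-- ===== PRECONDITION & SPEC =====
-- Pre_ excludes (a) inputs where A raises IndexError (fewer than 3 rows / 3 leading columns, or rows shorter than the
-- counts it scans), and (b) the corner row_count ≥ 4 ∧ column_count < 3: no 3-wide window fits there, yet A's incremental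
-- scan still slides a phantom 3-column window down column 0 while B keeps the seed (0,0) window — both values read cells
-- outside the declared area, so neither is the specified one.
def Pre_find_area (field : List (List Int)) (row_count : Int) (column_count : Int) : Prop :=
  3 ≤ (field.length : Int) ∧ (∀ row ∈ field.take 3, 3 ≤ (row.length : Int)) ∧
  (3 ≤ row_count → row_count ≤ (field.length : Int) ∧
    ∀ row ∈ field.take row_count.toNat, 3 ≤ (row.length : Int) ∧ column_count ≤ (row.length : Int)) ∧
  (4 ≤ row_count → 3 ≤ column_count)

instance (field : List (List Int)) (row_count : Int) (column_count : Int) : Decidable (Pre_find_area field row_count column_count) := by unfold Pre_find_area; infer_instance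

def pvWitness_find_area : List (List Int) × Int × Int := ([[1, 2, 3], [4, 5, 6], [7, 8, 9]], 3, 3)

def Spec_find_area (field : List (List Int)) (row_count : Int) (column_count : Int) (out : Int) : Prop := out = find_area_alt field row_count column_count
instance (field : List (List Int)) (row_count : Int) (column_count : Int) (out : Int) : Decidable (Spec_find_area field row_count column_count out) := by unfold Spec_find_area; infer_instance

-- ===== CLAIM (what is proved, stated in full; the proofs are below) =====
def Claim_equal_find_area : Prop := ∀ (field : List (List Int)) (row_count : Int) (column_count : Int), Dom_find_area field row_count column_count → Pre_find_area field row_count column_count → Spec_find_area field row_count column_count (find_area field row_count column_count)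

-- ===== LEMMAS AND PROOFS =====

-- the 3x3 window sum with top-left (r, c), written column-wise
def pvColS (f : List (List Int)) (r c : Int) : Int := pvCellA f r c + pvCellA f (r + 1) c + pvCellA f (r + 2) c
def pvRowS (f : List (List Int)) (r c : Int) : Int := pvCellA f r c + pvCellA f r (c + 1) + pvCellA f r (c + 2)
def pvW (f : List (List Int)) (r c : Int) : Int := pvColS f r c + pvColS f r (c + 1) + pvColS f r (c + 2)

-- minimum of M and the windows W r (c+1) .. W r (c+k)  (A's inner loop / B's row tail)
def pvScanRow (f : List (List Int)) (r : Int) (M c : Int) : Nat → Int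
  | 0 => M
  | k + 1 => pvScanRow f r (min M (pvW f r (c + 1))) (c + 1) k

-- minimum over the remaining k rows starting at r, m = number of inner iterations per row; M already contains W r 0
def pvScanGrid (f : List (List Int)) (m : Nat) (M r : Int) : Nat → Int
  | 0 => M
  | k + 1 =>
    let M1 := pvScanRow f r M 0 m
    if k = 0 then M1 else pvScanGrid f m (min M1 (pvW f (r + 1) 0)) (r + 1) k

lemma pvRange3 (a : Int) : PySem.List.pyRange a (a + 3) 1 = [a, a + 1, a + 2] := by
  rw [PySem.List.pyRange_one_cons (by omega), PySem.List.pyRange_one_cons (by omega),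
      PySem.List.pyRange_one_cons (by omega), PySem.List.pyRange_one_eq_nil (by omega)]
  have : a + 1 + 1 = a + 2 := by ring
  rw [this]

lemma pvGetSumFor_eq (f : List (List Int)) (r c : Int) : pvGetSumFor f r c = pvW f r c := by
  simp [pvGetSumFor, pvRange3, pvW, pvColS]; ring

lemma pvWinB_eq (f : List (List Int)) (r c : Int) : pvWinB f r c = pvW f r c := by
  have h3 : PySem.List.pyRange 0 3 1 = [0, 1, 2] := by decide
  simp [pvWinB, h3, pvW, pvColS, pvCellB, pvCellA]; ring

lemma pvMoveRight_eq (f : List (List Int)) (r c s : Int) :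
    pvMoveRight f r c s = s - pvColS f r c + pvColS f r (c + 3) := by
  simp only [pvMoveRight, pvRange3, List.foldl_cons, List.foldl_nil, pvColS]; ring

lemma pvMoveDown_eq (f : List (List Int)) (r s : Int) :
    pvMoveDown f r 0 s = s - pvRowS f r 0 + pvRowS f (r + 3) 0 := by
  simp only [pvMoveDown]
  rw [pvRange3 0]
  simp only [List.foldl_cons, List.foldl_nil, pvRowS]; ring

lemma pvW_right (f : List (List Int)) (r c : Int) :
    pvW f r c - pvColS f r c + pvColS f r (c + 3) = pvW f r (c + 1) := by
  simp only [pvW, pvColS]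
  have h1 : c + 1 + 1 = c + 2 := by ring
  have h2 : c + 1 + 2 = c + 3 := by ring
  rw [h1, h2]; ring

lemma pvW_down (f : List (List Int)) (r : Int) :
    pvW f r 0 - pvRowS f r 0 + pvRowS f (r + 3) 0 = pvW f (r + 1) 0 := by
  simp only [pvW, pvColS, pvRowS]
  have h1 : r + 1 + 1 = r + 2 := by ring
  have h2 : r + 1 + 2 = r + 3 := by ring
  rw [h1, h2]; ring

lemma pvInner_loop (f : List (List Int)) (r : Int) (k : Nat) : ∀ (c M : Int),
    (PySem.List.pyRange c (c + k) 1).foldl (pvInnerStep f r) (M, pvW f r c)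
      = (pvScanRow f r M c k, pvW f r (c + k)) := by
  induction k with
  | zero => intro c M; simp [PySem.List.pyRange_one_eq_nil, pvScanRow]
  | succ k ih =>
    intro c M
    rw [PySem.List.pyRange_one_cons (by omega)]
    have hb : c + ((k : Int) + 1) = (c + 1) + (k : Int) := by ring
    push_cast
    rw [hb]
    simp only [List.foldl_cons]
    have hstep : pvInnerStep f r (M, pvW f r c) c = (min M (pvW f r (c + 1)), pvW f r (c + 1)) := by
      simp [pvInnerStep, pvMoveRight_eq, pvW_right]
    rw [hstep, ih (c + 1) (min M (pvW f r (c + 1)))]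
    simp [pvScanRow]

lemma pvOuter_loop (f : List (List Int)) (rc cc : Int) (hcc : 3 ≤ cc) (k : Nat) :
    ∀ (r M : Int), r + k = rc - 2 → 1 ≤ k →
    ((PySem.List.pyRange r (rc - 2) 1).foldl (pvOuterStep f rc cc) (M, pvW f r 0, pvW f r 0)).1
      = pvScanGrid f (cc - 3).toNat M r k := by
  induction k with
  | zero => intro r M h h1; omega
  | succ k ih =>
    intro r M h _
    rw [PySem.List.pyRange_one_cons (by omega)]
    simp only [List.foldl_cons]
    have hinner := pvInner_loop f r (cc - 3).toNat 0 M
    rw [show (0 : Int) + ((cc - 3).toNat : Int) = cc - 3 from by omega] at hinner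
    by_cases hk : k = 0
    · subst hk
      have hcond : ¬ (r + 3 < rc) := by omega
      have hnil : PySem.List.pyRange (r + 1) (rc - 2) 1 = [] := by
        exact PySem.List.pyRange_one_eq_nil (by omega)
      simp only [pvOuterStep, hinner, hcond, if_false, hnil, List.foldl_nil]
      simp [pvScanGrid]
    · have hcond : r + 3 < rc := by omega
      have hdown : pvMoveDown f r 0 (pvW f r 0) = pvW f (r + 1) 0 := by
        rw [pvMoveDown_eq, pvW_down]
      simp only [pvOuterStep, hinner, hcond, if_true, hdown]
      rw [ih (r + 1) (min (pvScanRow f r M 0 (cc - 3).toNat) (pvW f (r + 1) 0)) (by omega) (by omega)]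
      simp [pvScanGrid, hk]

-- B's inner loop past column 0 accumulates exactly like pvScanRow
lemma pvRowTail_fold (f : List (List Int)) (r : Int) (k : Nat) : ∀ (c b : Int),
    (PySem.List.pyRange (c + 1) (c + 1 + k) 1).foldl (fun b c' => min b (pvW f r c')) b
      = pvScanRow f r b c k := by
  induction k with
  | zero => intro c b; simp [PySem.List.pyRange_one_eq_nil, pvScanRow]
  | succ k ih =>
    intro c b
    rw [PySem.List.pyRange_one_cons (a := c + 1) (b := c + 1 + ((k + 1 : Nat) : Int)) (by omega)]
    have hb : c + 1 + ((k : Int) + 1) = (c + 1) + 1 + (k : Int) := by ring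
    push_cast
    rw [hb]
    simp only [List.foldl_cons]
    rw [ih (c + 1) (min b (pvW f r (c + 1)))]
    simp [pvScanRow]

-- B's full inner loop (including column 0)
lemma pvAltRow (f : List (List Int)) (cc : Int) (hcc : 3 ≤ cc) (r b : Int) :
    (PySem.List.pyRange 0 (cc - 2) 1).foldl (fun b c => min b (pvWinB f r c)) b
      = pvScanRow f r (min b (pvW f r 0)) 0 (cc - 3).toNat := by
  simp only [pvWinB_eq]
  rw [show PySem.List.pyRange 0 (cc - 2) 1
        = 0 :: PySem.List.pyRange (0 + 1) (0 + 1 + ((cc - 3).toNat : Int)) 1 by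
      rw [PySem.List.pyRange_one_cons (by omega)]
      rw [show (0 : Int) + 1 + ((cc - 3).toNat : Int) = cc - 2 from by omega]]
  simp only [List.foldl_cons]
  exact pvRowTail_fold f r (cc - 3).toNat 0 (min b (pvW f r 0))

lemma pvAltGrid (f : List (List Int)) (cc : Int) (hcc : 3 ≤ cc) (k : Nat) :
    ∀ (r b : Int), 1 ≤ k →
    (PySem.List.pyRange r (r + k) 1).foldl (fun b r' =>
        (PySem.List.pyRange 0 (cc - 2) 1).foldl (fun b c => min b (pvWinB f r' c)) b) b
      = pvScanGrid f (cc - 3).toNat (min b (pvW f r 0)) r k := by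
  induction k with
  | zero => intro r b h; omega
  | succ k ih =>
    intro r b _
    rw [PySem.List.pyRange_one_cons (a := r) (b := r + ((k + 1 : Nat) : Int)) (by omega)]
    simp only [List.foldl_cons]
    rw [pvAltRow f cc hcc r b]
    by_cases hk : k = 0
    · subst hk
      rw [show PySem.List.pyRange (r + 1) (r + ((0 + 1 : Nat) : Int)) 1 = [] from
        PySem.List.pyRange_one_eq_nil (by omega)]
      simp [pvScanGrid]
    · have hb : r + ((k : Int) + 1) = (r + 1) + (k : Int) := by ring
      push_cast
      rw [hb, ih (r + 1) (pvScanRow f r (min b (pvW f r 0)) 0 (cc - 3).toNat) (by omega)]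
      simp [pvScanGrid, hk]

lemma find_area_eq_scan (f : List (List Int)) (rc cc : Int) (hrc : 3 ≤ rc) (hcc : 3 ≤ cc) :
    find_area f rc cc = pvScanGrid f (cc - 3).toNat (pvW f 0 0) 0 (rc - 2).toNat := by
  have h := pvOuter_loop f rc cc hcc (rc - 2).toNat 0 (pvW f 0 0) (by omega) (by omega)
  simp only [find_area, pvGetSumFor_eq]
  convert h using 4
  omega

lemma find_area_alt_eq_scan (f : List (List Int)) (rc cc : Int) (hrc : 3 ≤ rc) (hcc : 3 ≤ cc) :
    find_area_alt f rc cc = pvScanGrid f (cc - 3).toNat (pvW f 0 0) 0 (rc - 2).toNat := by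
  have h := pvAltGrid f cc hcc (rc - 2).toNat 0 (pvWinB f 0 0) (by omega)
  rw [show (0 : Int) + ((rc - 2).toNat : Int) = rc - 2 from by omega] at h
  simp only [find_area_alt]
  rw [h, pvWinB_eq, min_self]

-- ===== VERDICT (by name: the statement is the Claim_ definition above) =====
theorem find_area_spec : Claim_equal_find_area := by
  intro field rc cc _ hpre
  obtain ⟨-, -, -, himp4⟩ := hpre
  unfold Spec_find_area
  by_cases hrc : 3 ≤ rc
  · by_cases hcc : 3 ≤ cc
    · rw [find_area_eq_scan field rc cc hrc hcc, find_area_alt_eq_scan field rc cc hrc hcc]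
    · -- row_count = 3 and column_count < 3: both loops degenerate to the seed (0,0) window
      have hrc3 : rc = 3 := by
        by_contra h
        exact hcc (himp4 (by omega))
      subst hrc3
      simp only [find_area, find_area_alt]
      rw [show (3 : Int) - 3 + 1 = 1 from by norm_num, show (3 : Int) - 2 = 1 from by norm_num,
          show PySem.List.pyRange 0 1 1 = [0] from by decide]
      simp only [List.foldl_cons, List.foldl_nil, pvOuterStep]
      rw [show PySem.List.pyRange 0 (cc - 3) 1 = [] from PySem.List.pyRange_one_eq_nil (by omega),
          show PySem.List.pyRange 0 (cc - 2) 1 = [] from PySem.List.pyRange_one_eq_nil (by omega)]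
      norm_num [pvGetSumFor_eq, pvWinB_eq]
  · simp only [find_area, find_area_alt]
    rw [show PySem.List.pyRange 0 (rc - 3 + 1) 1 = [] from PySem.List.pyRange_one_eq_nil (by omega),
        show PySem.List.pyRange 0 (rc - 2) 1 = [] from PySem.List.pyRange_one_eq_nil (by omega)]
    simp only [List.foldl_nil]
    rw [pvGetSumFor_eq, pvWinB_eq]
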